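-- pv_equiv track=rewrite | github.com/PaulDong-Wilson/cs121-assignment-3 | ranker.py | rank_document
-- ===== SOURCE A (Python) =====
-- from collections import defaultdict
--
-- seen_words = set()
--
-- def rank_document(text_map: {str: [str]}, tag_weights: {str: int}) -> {str: int}:
--     # To hold the frequencies of all tokens in the given text map
--     token_frequencies = defaultdict(int)
--
--     # Loop through the tags in the given text_map, along with their associated token list
--     for next_tag, next_token_list in text_map.items():
--         # Get the weight for the next tag
--         next_tag_weight = 1
--         if next_tag in tag_weights:
--             next_tag_weight = tag_weights[next_tag]
--
--         # Loop through the next token list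
--         for next_token in next_token_list:
--             # Increment the current token's frequency by the weight of the current tag
--             token_frequencies[next_token] += next_tag_weight
--
--             # Save that the current token has been seen (if unique)
--             seen_words.add(next_token)
--
--     return token_frequencies
-- ===== SOURCE B (Python) =====
-- from collections import defaultdict
--
-- seen_words = set()
--
-- def rank_document(text_map: {str: [str]}, tag_weights: {str: int}) -> {str: int}:
--     # Stage 1: materialise one (token, weight) pair per token occurrence, remember the
--     # first-occurrence order of the distinct tokens, then sort the pairs by token.
--     pairs = [(t, tag_weights.get(tag, 1)) for tag, toks in text_map.items() for t in toks]
--     order = list(dict.fromkeys(t for t, _ in pairs))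
--     seen_words.update(order)
--     pairs.sort(key=lambda q: q[0])
--
--     # Stage 2: scan the sorted pairs run by run; each token's occurrences are now
--     # contiguous, so one linear sweep sums every token's total weight.
--     totals = {}
--     i = 0
--     n = len(pairs)
--     while i < n:
--         t = pairs[i][0]
--         s = pairs[i][1]
--         i += 1
--         while i < n and pairs[i][0] == t:
--             s += pairs[i][1]
--             i += 1
--         totals[t] = s
--
--     # Stage 3: emit the totals in first-occurrence order.
--     token_frequencies = defaultdict(int)
--     for t in order:
--         token_frequencies[t] = totals[t]
--     return token_frequencies
-- ===== Notes on version B (the rewrite author's own statement) =====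
-- stated objective: alternative
-- what changed: Instead of A's single pass that increments a running dict per token occurrence, B materialises one (token, weight) pair per occurrence, sorts the pairs by token, sums each token's now-contiguous run in one linear sweep, and finally emits the totals in first-occurrence order (sort-then-scan instead of hash accumulation).
import Mathlib
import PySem

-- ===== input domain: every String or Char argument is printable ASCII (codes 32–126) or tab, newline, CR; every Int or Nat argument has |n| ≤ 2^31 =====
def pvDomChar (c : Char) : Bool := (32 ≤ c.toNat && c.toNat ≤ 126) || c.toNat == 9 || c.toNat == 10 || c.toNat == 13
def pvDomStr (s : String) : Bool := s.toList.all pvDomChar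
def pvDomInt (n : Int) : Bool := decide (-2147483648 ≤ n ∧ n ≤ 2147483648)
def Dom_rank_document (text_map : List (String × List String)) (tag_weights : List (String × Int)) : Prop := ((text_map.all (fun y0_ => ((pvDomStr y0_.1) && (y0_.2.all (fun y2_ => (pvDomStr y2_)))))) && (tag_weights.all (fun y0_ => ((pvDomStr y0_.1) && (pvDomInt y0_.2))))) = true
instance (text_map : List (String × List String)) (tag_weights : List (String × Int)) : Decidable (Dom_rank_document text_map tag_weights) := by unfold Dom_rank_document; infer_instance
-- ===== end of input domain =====

-- B replaces A's hash-accumulation pass by sort-then-scan: one (token, weight) pair per occurrence,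
-- sorted by token, each token's contiguous run summed in one sweep, totals emitted in
-- first-occurrence order (objective: alternative). Both A and B also add every token to the
-- module-global set seen_words (same final set); the equivalence proved here is about the returned
-- frequency dict only.

-- ===== PORT A =====
def rank_document (text_map : List (String × List String)) (tag_weights : List (String × Int)) : List (String × Int) :=
  let tw := PySem.Dict.ofList tag_weights
  -- token_frequencies = defaultdict(int); for next_tag, next_token_list in text_map.items(): ...
  (text_map.foldl (fun freqs p =>
      -- next_tag_weight = 1; if next_tag in tag_weights: next_tag_weight = tag_weights[next_tag]
      let w : Int := if tw.contains p.1 then (tw.get? p.1).getD 1 else 1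
      -- for next_token in next_token_list: token_frequencies[next_token] += next_tag_weight
      -- (seen_words.add(next_token) does not affect the returned dict)
      p.2.foldl (fun d t => d.modify t 0 (· + w)) freqs)
    PySem.Dict.empty).items

-- ===== PORT B =====
-- B's inner "while i < n and pairs[i][0] == t: s += pairs[i][1]; i += 1": consume the run of
-- token t at the front of the remaining pairs, accumulating into s; returns (s, rest).
def pvTakeRun (t : String) (s : Int) : List (String × Int) → Int × List (String × Int)
  | [] => (s, [])
  | (t', w) :: rest => if t' == t then pvTakeRun t (s + w) rest else (s, (t', w) :: rest)

theorem pvTakeRun_length_le (t : String) (s : Int) (l : List (String × Int)) :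
    (pvTakeRun t s l).2.length ≤ l.length := by
  induction l generalizing s with
  | nil => simp [pvTakeRun]
  | cons q rest ih =>
    obtain ⟨t', w⟩ := q
    simp only [pvTakeRun]
    split
    · exact le_trans (ih _) (Nat.le_succ _)
    · simp

-- B's outer "while i < n: ... totals[t] = s": scan the sorted pairs run by run.
def pvRunScan : List (String × Int) → PySem.Dict String Int → PySem.Dict String Int
  | [], d => d
  | (t, w) :: rest, d =>
      pvRunScan (pvTakeRun t w rest).2 (d.insert t (pvTakeRun t w rest).1)
termination_by l _ => l.length
decreasing_by exact Nat.lt_succ_of_le (pvTakeRun_length_le t w rest)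

def rank_document_alt (text_map : List (String × List String)) (tag_weights : List (String × Int)) : List (String × Int) :=
  let tw := PySem.Dict.ofList tag_weights
  -- pairs = [(t, tag_weights.get(tag, 1)) for tag, toks in text_map.items() for t in toks]
  let pairs := text_map.flatMap (fun p => p.2.map (fun t => (t, tw.getD p.1 1)))
  -- order = list(dict.fromkeys(t for t, _ in pairs))   (seen_words.update(order): not the return value)
  let order := PySem.List.dedup (pairs.map Prod.fst)
  -- pairs.sort(key=lambda q: q[0])
  let spairs := PySem.List.sorted pairs (fun q => q.1) false
  -- the run-by-run while loop building totals
  let totals := pvRunScan spairs PySem.Dict.empty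
  -- for t in order: token_frequencies[t] = totals[t]
  -- (totals.getD t 0 is exact here: every t in order occurs in pairs, hence is a key of totals)
  (order.foldl (fun d t => d.insert t (totals.getD t 0)) PySem.Dict.empty).items

-- ===== PRECONDITION & SPEC =====
def Spec_rank_document (text_map : List (String × List String)) (tag_weights : List (String × Int)) (out : List (String × Int)) : Prop := out = rank_document_alt text_map tag_weights
instance (text_map : List (String × List String)) (tag_weights : List (String × Int)) (out : List (String × Int)) : Decidable (Spec_rank_document text_map tag_weights out) := by unfold Spec_rank_document; infer_instance

-- ===== CLAIM (what is proved, stated in full; the proofs are below) =====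
def Claim_equal_rank_document : Prop := ∀ (text_map : List (String × List String)) (tag_weights : List (String × Int)), Dom_rank_document text_map tag_weights → Spec_rank_document text_map tag_weights (rank_document text_map tag_weights)

-- ===== LEMMAS AND PROOFS =====

-- the total weight of token t in a pair list
def pvS (l : List (String × Int)) (t : String) : Int :=
  ((l.filter (fun q => q.1 == t)).map Prod.snd).sum

theorem pvS_nil (t : String) : pvS [] t = 0 := rfl

theorem pvS_cons (q : String × Int) (l : List (String × Int)) (t : String) :
    pvS (q :: l) t = (if q.1 == t then q.2 else 0) + pvS l t := by
  simp only [pvS, List.filter_cons]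
  split <;> simp

-- A's "in + index" weight lookup equals .get(tag, 1).
theorem pv_weight_eq (tw : PySem.Dict String Int) (k : String) :
    (if tw.contains k then (tw.get? k).getD 1 else 1) = tw.getD k 1 := by
  rw [PySem.Dict.getD_eq_get?_getD, PySem.Dict.contains_eq_isSome_get?]
  cases tw.get? k <;> simp

-- value after A's inner per-token loop
theorem pv_getD_A_inner (w : Int) (ts : List String) (d : PySem.Dict String Int) (v : String) :
    (ts.foldl (fun d t => d.modify t 0 (· + w)) d).getD v 0 = d.getD v 0 + w * ts.count v := by
  induction ts generalizing d with
  | nil => simp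
  | cons t ts ih =>
    simp only [List.foldl_cons, ih, PySem.Dict.getD_modify, List.count_cons]
    by_cases h : v = t
    · simp [h]; ring
    · have : (t == v) = false := by simp [Ne.symm h]
      simp [h, this]

-- value at v after A's whole outer loop: starting value plus the weighted-count sum over the tags
theorem pv_getD_A_outer (tw : PySem.Dict String Int) (tm : List (String × List String))
    (d : PySem.Dict String Int) (v : String) :
    (tm.foldl (fun freqs p =>
        let w : Int := if tw.contains p.1 then (tw.get? p.1).getD 1 else 1
        p.2.foldl (fun d t => d.modify t 0 (· + w)) freqs) d).getD v 0
      = d.getD v 0 + (tm.map (fun p => tw.getD p.1 1 * (p.2.count v : Int))).sum := by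
  induction tm generalizing d with
  | nil => simp
  | cons p tm ih =>
    simp only [List.foldl_cons]
    rw [ih, pv_getD_A_inner, pv_weight_eq, List.map_cons, List.sum_cons]
    ring

-- keys after A's whole outer loop: the distinct tokens of the flattened lists, in order
theorem pv_keys_A (tw : PySem.Dict String Int) (tm : List (String × List String))
    (d : PySem.Dict String Int) :
    (tm.foldl (fun freqs p =>
        let w : Int := if tw.contains p.1 then (tw.get? p.1).getD 1 else 1
        p.2.foldl (fun d t => d.modify t 0 (· + w)) freqs) d).keys
      = PySem.Set.update d.keys ((tm.map Prod.snd).flatten) := by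
  induction tm generalizing d with
  | nil => simp
  | cons p tm ih =>
    simp only [List.foldl_cons, List.map_cons, List.flatten_cons, PySem.Set.update_append]
    rw [ih, PySem.Dict.keys_foldl_modify]

-- pvTakeRun on a sorted tail whose elements are all ≥ t: it collects exactly the weight of t,
-- the remainder has no t, keeps the per-token weights of the other tokens, and stays sorted
theorem pv_takeRun_spec (t : String) (s : Int) (l : List (String × Int))
    (h1 : (l.map Prod.fst).Pairwise (· ≤ ·)) (h2 : ∀ q ∈ l, t ≤ q.1) :
    (pvTakeRun t s l).1 = s + pvS l t ∧
    (∀ q ∈ (pvTakeRun t s l).2, q ∈ l ∧ q.1 ≠ t) ∧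
    (∀ q ∈ l, q.1 ≠ t → q ∈ (pvTakeRun t s l).2) ∧
    (∀ u, u ≠ t → pvS (pvTakeRun t s l).2 u = pvS l u) ∧
    ((pvTakeRun t s l).2.map Prod.fst).Pairwise (· ≤ ·) := by
  induction l generalizing s with
  | nil => simp [pvTakeRun, pvS_nil]
  | cons q rest ih =>
    obtain ⟨t', w⟩ := q
    simp only [List.map_cons, List.pairwise_cons] at h1
    by_cases heq : t' = t
    · subst heq
      have h2' : ∀ q ∈ rest, t' ≤ q.1 := by
        intro q hq; exact h1.1 q.1 (List.mem_map_of_mem hq)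
      obtain ⟨ha, hb, hc, he, hd⟩ := ih (s + w) h1.2 h2'
      simp only [pvTakeRun, beq_self_eq_true, if_true]
      refine ⟨?_, ?_, ?_, ?_, hd⟩
      · rw [ha, pvS_cons]
        simp; ring
      · intro q hq
        obtain ⟨hm, hn⟩ := hb q hq
        exact ⟨List.mem_cons_of_mem _ hm, hn⟩
      · intro q hq hne
        rcases List.mem_cons.mp hq with h | h
        · exact absurd (by rw [h]) hne
        · exact hc q h hne
      · intro u hu
        rw [he u hu, pvS_cons]
        have hb2 : (t' == u) = false := by simp [Ne.symm hu]
        simp [hb2]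
    · have hbeq : (t' == t) = false := by simp [heq]
      have hlt : ∀ q ∈ (t', w) :: rest, q.1 ≠ t := by
        intro q hq
        rcases List.mem_cons.mp hq with h | h
        · rw [h]; exact heq
        · have ht' : t ≤ t' := h2 (t', w) (List.mem_cons_self ..)
          have : t' ≤ q.1 := h1.1 q.1 (List.mem_map_of_mem h)
          have : t < q.1 := lt_of_lt_of_le (lt_of_le_of_ne ht' (Ne.symm heq)) this
          exact (ne_of_lt this).symm
      refine ⟨?_, ?_, ?_, ?_, ?_⟩
      · have hz : pvS ((t', w) :: rest) t = 0 := by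
          have : ((t', w) :: rest).filter (fun q => q.1 == t) = [] := by
            apply List.filter_eq_nil_iff.mpr
            intro q hq
            simp [hlt q hq]
          simp [pvS, this]
        simp [pvTakeRun, hbeq, hz]
      · intro q hq
        simp only [pvTakeRun, hbeq, if_neg Bool.false_ne_true] at hq
        exact ⟨hq, hlt q hq⟩
      · intro q hq _
        simpa [pvTakeRun, hbeq] using hq
      · intro u _
        rw [pvTakeRun, hbeq, if_neg Bool.false_ne_true]
      · simp only [pvTakeRun, hbeq, if_neg Bool.false_ne_true]
        simp only [List.map_cons, List.pairwise_cons]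
        exact h1

-- the run scan of a key-sorted pair list: each present token maps to its total weight
theorem pv_runScan_getD : ∀ (n : Nat) (l : List (String × Int)), l.length ≤ n →
    (l.map Prod.fst).Pairwise (· ≤ ·) → ∀ (d : PySem.Dict String Int) (u : String),
    (pvRunScan l d).getD u 0 = if u ∈ l.map Prod.fst then pvS l u else d.getD u 0 := by
  intro n
  induction n with
  | zero =>
    intro l hl _ d u
    rw [List.length_eq_zero_iff.mp (Nat.le_zero.mp hl)]
    simp [pvRunScan]
  | succ n ih =>
    intro l hl h1 d u
    match l with
    | [] => simp [pvRunScan]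
    | (t, w) :: rest =>
      simp only [List.map_cons, List.pairwise_cons] at h1
      have h2 : ∀ q ∈ rest, t ≤ q.1 := by
        intro q hq; exact h1.1 q.1 (List.mem_map_of_mem hq)
      obtain ⟨ha, hb, hc, he, hd⟩ := pv_takeRun_spec t w rest h1.2 h2
      have hlen : (pvTakeRun t w rest).2.length ≤ n := by
        have h3 := pvTakeRun_length_le t w rest
        simp only [List.length_cons] at hl
        omega
      simp only [pvRunScan]
      rw [ih _ hlen hd]
      by_cases hu : u ∈ (pvTakeRun t w rest).2.map Prod.fst
      · obtain ⟨q, hq, hq2⟩ := List.mem_map.mp hu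
        obtain ⟨hm, hn⟩ := hb q hq
        have hut : u ≠ t := hq2 ▸ hn
        have hul : u ∈ ((t, w) :: rest).map Prod.fst :=
          List.mem_map.mpr ⟨q, List.mem_cons_of_mem _ hm, hq2⟩
        rw [if_pos hu, if_pos hul]
        rw [he u hut, pvS_cons]
        have : (t == u) = false := by simp [Ne.symm hut]
        simp [this]
      · rw [if_neg hu, PySem.Dict.getD_insert]
        by_cases hut : u = t
        · subst hut
          have hul : u ∈ ((u, w) :: rest).map Prod.fst := by simp
          rw [if_pos rfl, if_pos hul, ha, pvS_cons]
          simp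
        · have hur : u ∉ rest.map Prod.fst := by
            intro hmem
            obtain ⟨q, hq, hq2⟩ := List.mem_map.mp hmem
            exact hu (List.mem_map.mpr ⟨q, hc q hq (hq2 ▸ hut), hq2⟩)
          have hul : u ∉ ((t, w) :: rest).map Prod.fst := by
            simp only [List.map_cons, List.mem_cons, not_or]
            exact ⟨hut, hur⟩
          rw [if_neg (by simp [hut]), if_neg hul]

-- pvS is a permutation invariant
theorem pvS_perm (l l' : List (String × Int)) (h : l.Perm l') (t : String) :
    pvS l t = pvS l' t := by
  unfold pvS
  exact List.Perm.sum_eq (List.Perm.map _ (List.Perm.filter _ h))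

-- pvS of the flatMap of weighted token lists = the weighted-count sum
theorem pv_S_tag (w : Int) (ts : List String) (u : String) :
    pvS (ts.map (fun t => (t, w))) u = w * ts.count u := by
  induction ts with
  | nil => simp [pvS_nil]
  | cons t ts ih =>
    rw [List.map_cons, pvS_cons, ih, List.count_cons]
    by_cases h : t = u
    · simp [h]; ring
    · simp [h, Ne.symm h]

theorem pv_S_pairs (tw : PySem.Dict String Int) (tm : List (String × List String)) (u : String) :
    pvS (tm.flatMap (fun p => p.2.map (fun t => (t, tw.getD p.1 1)))) u
      = (tm.map (fun p => tw.getD p.1 1 * (p.2.count u : Int))).sum := by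
  induction tm with
  | nil => simp [pvS_nil]
  | cons p tm ih =>
    rw [List.flatMap_cons, List.map_cons, List.sum_cons, ← ih, ← pv_S_tag (tw.getD p.1 1) p.2 u]
    unfold pvS
    rw [List.filter_append, List.map_append, List.sum_append]

-- B's final fold: the dict whose keys are the nodup list `order` with the given values
theorem pv_getD_B_unmoved (val : String → Int) (order : List String)
    (d : PySem.Dict String Int) (v : String) (hv : v ∉ order) :
    (order.foldl (fun d k => d.insert k (val k)) d).getD v 0 = d.getD v 0 := by
  induction order generalizing d with
  | nil => rfl
  | cons k ks ih =>
    simp only [List.mem_cons, not_or] at hv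
    simp only [List.foldl_cons]
    rw [ih _ hv.2, PySem.Dict.getD_insert]
    simp [hv.1]

theorem pv_getD_B (val : String → Int) (order : List String) (hn : order.Nodup)
    (d : PySem.Dict String Int) (v : String) (hv : v ∈ order) :
    (order.foldl (fun d k => d.insert k (val k)) d).getD v 0 = val v := by
  induction order generalizing d with
  | nil => cases hv
  | cons k ks ih =>
    simp only [List.foldl_cons]
    rcases List.mem_cons.mp hv with h | h
    · subst h
      rw [pv_getD_B_unmoved val ks _ v (List.nodup_cons.mp hn).1, PySem.Dict.getD_insert]
      simp
    · exact ih (List.nodup_cons.mp hn).2 _ h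

theorem pv_keys_B (val : String → Int) (order : List String)
    (d : PySem.Dict String Int) :
    (order.foldl (fun d k => d.insert k (val k)) d).keys = PySem.Set.update d.keys order := by
  have := PySem.Dict.keys_foldl_insert_key order id (fun _ k => val k) d
  simpa using this

-- ===== VERDICT (by name: the statement is the Claim_ definition above) =====
theorem rank_document_spec : Claim_equal_rank_document := by
  intro text_map tag_weights _
  unfold Spec_rank_document rank_document rank_document_alt
  apply congrArg PySem.Dict.items
  apply PySem.Dict.ext
  set tw := PySem.Dict.ofList tag_weights with htw
  set pairs := text_map.flatMap (fun p => p.2.map (fun t => (t, tw.getD p.1 1))) with hpairs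
  set spairs := PySem.List.sorted pairs (fun q => q.1) false with hspairs
  have hfst : pairs.map Prod.fst = (text_map.map Prod.snd).flatten := by
    rw [hpairs, List.map_flatMap]
    simp [List.flatMap_def, Function.comp_def]
  set order := PySem.List.dedup (pairs.map Prod.fst) with horder
  have horder' : order = PySem.Set.ofList ((text_map.map Prod.snd).flatten) := by
    simp [horder, hfst]
  have hnodup : order.Nodup := by rw [horder']; exact PySem.Set.nodup_ofList _
  have hkA : (text_map.foldl (fun freqs p =>
      let w : Int := if tw.contains p.1 then (tw.get? p.1).getD 1 else 1
      p.2.foldl (fun d t => d.modify t 0 (· + w)) freqs) PySem.Dict.empty).keys = order := by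
    rw [pv_keys_A, horder']
    simp only [PySem.Dict.keys_empty, PySem.Set.update_nil_left]
  have hkB : ((order.foldl (fun d t =>
      d.insert t ((pvRunScan spairs PySem.Dict.empty).getD t 0)) PySem.Dict.empty)).keys = order := by
    rw [pv_keys_B]
    simp only [PySem.Dict.keys_empty, PySem.Set.update_nil_left, horder', PySem.Set.ofList_ofList]
  have hnA : (text_map.foldl (fun freqs p =>
      let w : Int := if tw.contains p.1 then (tw.get? p.1).getD 1 else 1
      p.2.foldl (fun d t => d.modify t 0 (· + w)) freqs) PySem.Dict.empty).keys.Nodup := by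
    rw [hkA]; exact hnodup
  have hnB : ((order.foldl (fun d t =>
      d.insert t ((pvRunScan spairs PySem.Dict.empty).getD t 0)) PySem.Dict.empty)).keys.Nodup := by
    rw [hkB]; exact hnodup
  rw [PySem.Dict.items_eq_map_keys _ hnA 0, PySem.Dict.items_eq_map_keys _ hnB 0, hkA, hkB]
  apply List.map_congr_left
  intro v hv
  have hperm : spairs.Perm pairs := PySem.List.sorted_perm pairs (fun q => q.1) false
  have hvP : v ∈ pairs.map Prod.fst := by
    rw [hfst]
    exact (PySem.Set.mem_ofList _ _).mp (horder' ▸ hv)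
  have hvS : v ∈ spairs.map Prod.fst := by
    obtain ⟨q, hq, hq2⟩ := List.mem_map.mp hvP
    exact List.mem_map.mpr ⟨q, (PySem.List.mem_sorted ..).mpr hq, hq2⟩
  rw [pv_getD_A_outer,
    pv_getD_B (fun t => (pvRunScan spairs PySem.Dict.empty).getD t 0) order hnodup _ v hv]
  rw [pv_runScan_getD spairs.length spairs le_rfl
    (by simpa using PySem.List.sorted_map_key_pairwise pairs (fun q => q.1)) PySem.Dict.empty v,
    if_pos hvS, pvS_perm spairs pairs hperm, hpairs, pv_S_pairs]
  simp [PySem.Dict.getD_empty]
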